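-- pv_equiv track=rewrite | github.com/baiwan-chenhao/rewrite | leetcode_gen_week2.py | solve
-- ===== SOURCE A (Python) =====
-- from typing import List, Tuple
--
-- def solve(nums: List[int], k: int) -> int:
--     import math
--     MOD = 1_000_000_007
--     nums.sort()
--     ans = 0
--     s = 1
--     for i, x in enumerate(nums):
--         ans += (x + nums[-1 - i]) * s
--         s = (s * 2 - math.comb(i, k - 1)) % MOD
--     return ans % MOD
-- ===== SOURCE B (Python) =====
-- def solve(nums, k):
--     # Same return value as the original; sorts nums in place like the original.
--     MOD = 1_000_000_007
--     nums.sort()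
--     n = len(nums)
--     # S[i] = number of subsets of size < k of an i-element set, mod MOD,
--     # accumulated column by column of Pascal's triangle (no binomials computed):
--     # the next column is the prefix sums of the current one (hockey-stick identity).
--     S = [0] * n
--     col = [1] * n                      # column j = 0: C(i, 0) = 1
--     for j in range(min(k, n)):
--         S = [(s + c) % MOD for s, c in zip(S, col)]
--         pre = 0
--         new_col = []
--         for c in col:                  # C(i, j+1) = sum of C(m, j) for m < i
--             new_col.append(pre)
--             pre = (pre + c) % MOD
--         col = new_col
--     return sum(x * (S[i] + S[n - 1 - i]) for i, x in enumerate(nums)) % MOD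
-- ===== Notes on version B (the rewrite author's own statement) =====
-- stated objective: alternative
-- what changed: B drops the paired front/back loop with the doubling weight 2s-comb(i,k-1) entirely: it builds the per-element weights S[i] = #subsets of size < k (mod p) by sweeping min(k,n) columns of Pascal's triangle, each next column obtained as prefix sums of the previous one (hockey-stick identity, so no binomial is ever computed and no big integers arise), then returns sum(x*(S[i]+S[n-1-i])) mod p; it trades math.comb's C-level speed for pure word-sized modular arithmetic.
import Mathlib
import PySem

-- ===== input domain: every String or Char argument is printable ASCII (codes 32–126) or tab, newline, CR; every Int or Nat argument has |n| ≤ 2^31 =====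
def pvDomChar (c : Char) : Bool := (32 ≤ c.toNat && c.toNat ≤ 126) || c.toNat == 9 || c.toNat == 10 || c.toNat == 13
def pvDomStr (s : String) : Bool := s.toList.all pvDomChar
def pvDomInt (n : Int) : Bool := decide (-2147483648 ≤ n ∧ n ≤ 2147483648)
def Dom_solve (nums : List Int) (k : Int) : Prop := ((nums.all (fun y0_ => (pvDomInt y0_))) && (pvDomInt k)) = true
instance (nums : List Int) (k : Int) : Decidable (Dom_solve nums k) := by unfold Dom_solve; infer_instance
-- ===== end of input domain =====

-- B replaces A's paired front/back loop with doubling weight s = 2s - comb(i,k-1) by a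
-- column-by-column sweep of Pascal's triangle (each next column = prefix sums of the previous,
-- no binomial computed) building per-element weights S[i], then sums x*(S[i]+S[n-1-i]) mod p.
-- Both A and B sort `nums` in place in Python; the equivalence proved here is about the return value.

-- ===== PORT A =====
-- math.comb n k; Python raises ValueError for k < 0 (excluded by Pre_solve) — 0 there is arbitrary
def pyComb (n k : Int) : Int :=
  if k < 0 then 0
  else if n < k then 0  -- math.comb is 0 for k > n; the guard keeps Nat.choose evaluable for huge k
  else (Nat.choose n.toNat k.toNat : Int)

def solve (nums : List Int) (k : Int) : Int :=
  let a := PySem.List.sorted nums id false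
  let st := (PySem.List.enumerate a 0).foldl
    (fun (st : Int × Int) p =>
      (st.1 + (p.2 + PySem.List.pyGetD a (-1 - p.1) 0) * st.2,
       PySem.Int.mod (st.2 * 2 - pyComb p.1 (k - 1)) 1000000007))
    (0, 1)
  PySem.Int.mod st.1 1000000007

-- ===== PORT B =====
def solve_alt (nums : List Int) (k : Int) : Int :=
  let a := PySem.List.sorted nums id false
  let n : Int := (a.length : Int)
  let st := (PySem.List.pyRange 0 (min k n) 1).foldl
    (fun (st : List Int × List Int) _j =>
      let S' := List.zipWith (fun s c => PySem.Int.mod (s + c) 1000000007) st.1 st.2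
      let col' := (st.2.foldl
        (fun (pc : List Int × Int) c =>
          (pc.1 ++ [pc.2], PySem.Int.mod (pc.2 + c) 1000000007))
        ([], 0)).1
      (S', col'))
    (List.replicate a.length 0, List.replicate a.length 1)
  PySem.Int.mod
    ((PySem.List.enumerate a 0).foldl
      (fun acc p =>
        acc + p.2 * (PySem.List.pyGetD st.1 p.1 0 + PySem.List.pyGetD st.1 (n - 1 - p.1) 0))
      0)
    1000000007

-- ===== PRECONDITION & SPEC =====
-- A raises ValueError (math.comb with negative second argument) whenever nums is nonempty and k ≤ 0.
def Pre_solve (nums : List Int) (k : Int) : Prop := nums = [] ∨ 1 ≤ k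
instance (nums : List Int) (k : Int) : Decidable (Pre_solve nums k) := by unfold Pre_solve; infer_instance
def pvWitness_solve : List Int × Int := ([3, 1, 2], 2)

def Spec_solve (nums : List Int) (k : Int) (out : Int) : Prop := out = solve_alt nums k
instance (nums : List Int) (k : Int) (out : Int) : Decidable (Spec_solve nums k out) := by unfold Spec_solve; infer_instance

-- ===== CLAIM (what is proved, stated in full; the proofs are below) =====
def Claim_equal_solve : Prop := ∀ (nums : List Int) (k : Int), Dom_solve nums k → Pre_solve nums k → Spec_solve nums k (solve nums k)

-- ===== LEMMAS AND PROOFS =====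

-- the exact number-theoretic weight both programs compute: Sv K i = #subsets of size < K, wv its residue
def Sv (K i : Nat) : Int := ∑ j ∈ Finset.range K, ((Nat.choose i j : Nat) : Int)
def wv (K i : Nat) : Int := Sv K i % 1000000007
def colv (j i : Nat) : Int := ((Nat.choose i j : Nat) : Int) % 1000000007

-- step functions of the loops (proof-only names for the inline lambdas of the ports)
def fA (a : List Int) (k : Int) (st : Int × Int) (i : Int) : Int × Int :=
  (st.1 + (PySem.List.pyGetD a i 0 + PySem.List.pyGetD a (-1 - i) 0) * st.2,
   PySem.Int.mod (st.2 * 2 - pyComb i (k - 1)) 1000000007)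

def fB (st : List Int × List Int) (_j : Int) : List Int × List Int :=
  (List.zipWith (fun s c => PySem.Int.mod (s + c) 1000000007) st.1 st.2,
   (st.2.foldl
     (fun (pc : List Int × Int) c =>
       (pc.1 ++ [pc.2], PySem.Int.mod (pc.2 + c) 1000000007))
     ([], 0)).1)

lemma solve_eq_fold (nums : List Int) (k : Int) :
    solve nums k =
      PySem.Int.mod
        (((PySem.List.pyRange 0 ((PySem.List.sorted nums id false).length) 1).foldl
          (fA (PySem.List.sorted nums id false) k) (0, 1)).1) 1000000007 := by
  simp only [solve]
  rw [PySem.List.enumerate_eq_map_pyRange (d := 0), List.foldl_map]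
  rfl

lemma solve_alt_eq_fold (nums : List Int) (k : Int) :
    solve_alt nums k =
      PySem.Int.mod
        ((PySem.List.pyRange 0 (((PySem.List.sorted nums id false).length : Nat) : Int) 1).foldl
          (fun acc j => acc + PySem.List.pyGetD (PySem.List.sorted nums id false) j 0 *
            (PySem.List.pyGetD
               ((PySem.List.pyRange 0 (min k (((PySem.List.sorted nums id false).length : Nat) : Int)) 1).foldl fB
                 (List.replicate (PySem.List.sorted nums id false).length 0,
                  List.replicate (PySem.List.sorted nums id false).length 1)).1 j 0 +
             PySem.List.pyGetD
               ((PySem.List.pyRange 0 (min k (((PySem.List.sorted nums id false).length : Nat) : Int)) 1).foldl fB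
                 (List.replicate (PySem.List.sorted nums id false).length 0,
                  List.replicate (PySem.List.sorted nums id false).length 1)).1
               ((((PySem.List.sorted nums id false).length : Nat) : Int) - 1 - j) 0))
          0)
        1000000007 := by
  simp only [solve_alt]
  rw [PySem.List.enumerate_eq_map_pyRange (d := 0), List.foldl_map]
  rfl

-- arithmetic of residues
lemma emod_add_emod (a b : Int) :
    (a % 1000000007 + b % 1000000007) % 1000000007 = (a + b) % 1000000007 := by
  rw [← Int.add_emod]

lemma emod_mul2_sub (x c : Int) :
    (x % 1000000007 * 2 - c) % 1000000007 = (x * 2 - c) % 1000000007 := by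
  rw [Int.sub_emod, Int.mul_emod, Int.emod_emod_of_dvd _ dvd_rfl, ← Int.mul_emod, ← Int.sub_emod]

-- Sv basics
lemma Sv_zero (K : Nat) (hK : 1 ≤ K) : Sv K 0 = 1 := by
  unfold Sv
  rw [Finset.sum_eq_single 0]
  · simp
  · intro b _ hb
    rw [Nat.choose_eq_zero_of_lt (by omega)]; rfl
  · intro h; exact absurd (Finset.mem_range.mpr (by omega)) h

lemma Sv_succ (K i : Nat) (hK : 1 ≤ K) :
    Sv K (i + 1) = 2 * Sv K i - ((Nat.choose i (K - 1) : Nat) : Int) := by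
  induction K with
  | zero => omega
  | succ m ih =>
    rcases Nat.eq_zero_or_pos m with hm | hm
    · subst hm; simp [Sv]
    · have h1 : Sv (m + 1) (i + 1) = Sv m (i + 1) + ((Nat.choose (i + 1) m : Nat) : Int) := by
        unfold Sv; rw [Finset.sum_range_succ]
      have h2 : Sv (m + 1) i = Sv m i + ((Nat.choose i m : Nat) : Int) := by
        unfold Sv; rw [Finset.sum_range_succ]
      have hc : (Nat.choose (i + 1) m : Int) = (Nat.choose i (m - 1) : Int) + (Nat.choose i m : Int) := by
        obtain ⟨m', rfl⟩ : ∃ m', m = m' + 1 := ⟨m - 1, by omega⟩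
        have := Nat.choose_succ_succ' (i) (m')
        simp only [Nat.add_sub_cancel]
        exact_mod_cast congrArg (Nat.cast : Nat → Int) this
      rw [h1, h2, ih hm, show m + 1 - 1 = m from by omega, hc]
      ring_nf

-- Sv truncated at min K n agrees with Sv K for indices below n
lemma Sv_min (K n i : Nat) (hi : i < n) : Sv (min K n) i = Sv K i := by
  unfold Sv
  apply Finset.sum_subset
  · intro x hx
    rw [Finset.mem_range] at hx ⊢
    exact lt_of_lt_of_le hx (Nat.min_le_left K n)
  · intro m hm hnot
    rw [Finset.mem_range] at hm
    rw [Finset.mem_range] at hnot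
    have hmin : min K n ≤ m := Nat.le_of_not_lt hnot
    have him : i < m := by
      rcases Nat.le_total K n with hle | hle
      · have hx : min K n = K := Nat.min_eq_left hle
        omega
      · have hx : min K n = n := Nat.min_eq_right hle
        omega
    rw [Nat.choose_eq_zero_of_lt him]
    rfl

lemma pyComb_eq (i : Nat) (k : Int) (hk : 1 ≤ k) :
    pyComb (i : Int) (k - 1) = (Nat.choose i (k - 1).toNat : Int) := by
  unfold pyComb
  rw [if_neg (by omega)]
  by_cases h : (i : Int) < k - 1
  · rw [if_pos h, Nat.choose_eq_zero_of_lt (by omega)]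
    simp
  · rw [if_neg h]
    simp

-- negative index equals the front index n-1-i, as List.getD
lemma idx_eq (a : List Int) (i : Nat) (h : i < a.length) :
    PySem.List.pyGetD a (-1 - (i : Int)) 0 = a.getD (a.length - 1 - i) 0 := by
  have h1 : (-1 - (i : Int)) = -(((i + 1 : Nat)) : Int) := by push_cast; ring
  rw [h1, PySem.List.pyGetD_neg_natCast _ _ _ (by omega) (by omega)]
  have hlt : a.length - 1 - i < a.length := by omega
  simp only [show a.length - (i + 1) = a.length - 1 - i from by omega]
  simp [List.getD, List.getElem?_eq_getElem hlt]

-- ===== A-side: the loop computes the Finset sum of (a_i + a_{n-1-i}) * wv K i =====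
lemma loopA (a : List Int) (k : Int) (hk : 1 ≤ k) :
    ∀ (cnt i : Nat), i + cnt = a.length → ∀ (ans : Int),
    ((PySem.List.pyRange (i : Int) ((i : Int) + (cnt : Int)) 1).foldl
        (fA a k) (ans, wv k.toNat i)).1
      = ans + ∑ t ∈ Finset.range cnt,
          (a.getD (i + t) 0 + a.getD (a.length - 1 - (i + t)) 0) * wv k.toNat (i + t) := by
  intro cnt
  induction cnt with
  | zero =>
    intro i hi ans
    rw [show ((i : Int) + ((0 : Nat) : Int)) = (i : Int) by push_cast; ring]
    rw [PySem.List.pyRange_one_eq_nil (le_refl _)]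
    simp
  | succ m ih =>
    intro i hi ans
    have hlt : (i : Int) < (i : Int) + ((m + 1 : Nat) : Int) := by push_cast; omega
    rw [PySem.List.pyRange_one_cons hlt, List.foldl_cons]
    have hiL : i < a.length := by omega
    have hstep :
        fA a k (ans, wv k.toNat i) (i : Int)
          = (ans + (a.getD i 0 + a.getD (a.length - 1 - i) 0) * wv k.toNat i,
             wv k.toNat (i + 1)) := by
      unfold fA
      refine Prod.ext ?_ ?_
      · simp only [idx_eq a i hiL, PySem.List.pyGetD_natCast]
      · simp only
        rw [pyComb_eq i k hk, PySem.Int.mod_eq_emod_of_pos (by norm_num)]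
        unfold wv
        rw [emod_mul2_sub, show (k - 1).toNat = k.toNat - 1 from by omega,
          Sv_succ k.toNat i (by omega)]
        congr 1
        ring
    rw [hstep]
    have harg2 : (i : Int) + ((m + 1 : Nat) : Int) = ((i + 1 : Nat) : Int) + ((m : Nat) : Int) := by
      push_cast; ring
    rw [harg2, show ((i : Int) + 1) = ((i + 1 : Nat) : Int) by push_cast; ring]
    rw [ih (i + 1) (by omega)]
    rw [Finset.sum_range_succ']
    have hsum : ∑ t ∈ Finset.range m,
        (a.getD (i + (t + 1)) 0 + a.getD (a.length - 1 - (i + (t + 1))) 0) * wv k.toNat (i + (t + 1))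
        = ∑ t ∈ Finset.range m,
        (a.getD ((i + 1) + t) 0 + a.getD (a.length - 1 - ((i + 1) + t)) 0) * wv k.toNat ((i + 1) + t) := by
      apply Finset.sum_congr rfl
      intro t _
      rw [show i + (t + 1) = (i + 1) + t from by omega]
    rw [hsum, Nat.add_zero]
    ring

-- ===== B-side part 1: the sweep =====
lemma zipWith_map_same {α β γ δ : Type} (f : β → γ → δ) (g : α → β) (h : α → γ) :
    ∀ (l : List α), List.zipWith f (l.map g) (l.map h) = l.map (fun x => f (g x) (h x)) := by
  intro l
  induction l with
  | nil => rfl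
  | cons x xs ih => simp [ih]

lemma prefix_fold (J : Nat) :
    ∀ (cnt i : Nat) (acc : List Int),
    (((List.range' i cnt).map (colv J)).foldl
        (fun (pc : List Int × Int) c =>
          (pc.1 ++ [pc.2], PySem.Int.mod (pc.2 + c) 1000000007))
        (acc, colv (J + 1) i))
      = (acc ++ (List.range' i cnt).map (colv (J + 1)), colv (J + 1) (i + cnt)) := by
  intro cnt
  induction cnt with
  | zero =>
    intro i acc
    simp only [List.range'_zero, List.map_nil, List.foldl_nil, List.append_nil, Nat.add_zero]
  | succ m ih =>
    intro i acc
    rw [List.range'_succ, List.map_cons, List.foldl_cons]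
    have hstep : PySem.Int.mod (colv (J + 1) i + colv J i) 1000000007 = colv (J + 1) (i + 1) := by
      rw [PySem.Int.mod_eq_emod_of_pos (by norm_num)]
      unfold colv
      rw [emod_add_emod]
      have := Nat.choose_succ_succ' i J
      rw [show (i + 1).choose (J + 1) = i.choose J + i.choose (J + 1) from this]
      push_cast
      ring_nf
    rw [hstep, ih (i + 1) (acc ++ [colv (J + 1) i])]
    simp [List.append_assoc, show i + (m + 1) = i + 1 + m from by omega]

lemma fB_step (n J : Nat) :
    fB ((List.range n).map (wv J), (List.range n).map (colv J)) (J : Int)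
      = ((List.range n).map (wv (J + 1)), (List.range n).map (colv (J + 1))) := by
  unfold fB
  refine Prod.ext ?_ ?_
  · simp only
    rw [zipWith_map_same]
    apply List.map_congr_left
    intro i _
    rw [PySem.Int.mod_eq_emod_of_pos (by norm_num)]
    unfold wv colv Sv
    rw [emod_add_emod, Finset.sum_range_succ]
  · simp only
    have h0 : (0 : Int) = colv (J + 1) 0 := by
      unfold colv
      rw [Nat.choose_eq_zero_of_lt (by omega)]
      rfl
    rw [List.range_eq_range', h0, prefix_fold J n 0 []]
    simp

lemma sweep (n : Nat) :
    ∀ (J : Nat),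
    (PySem.List.pyRange 0 (J : Int) 1).foldl fB
        ((List.range n).map (wv 0), (List.range n).map (colv 0))
      = ((List.range n).map (wv J), (List.range n).map (colv J)) := by
  intro J
  induction J with
  | zero => rw [PySem.List.pyRange_one_eq_nil (by norm_num)]; rfl
  | succ m ih =>
    rw [show ((m + 1 : Nat) : Int) = ((m : Nat) : Int) + 1 by push_cast; ring]
    rw [PySem.List.pyRange_one_succ_right (by positivity), List.foldl_append, ih]
    simpa using fB_step n m

-- ===== B-side part 2: the final fold is a Finset sum =====
lemma loopC (f : Int → Int) :
    ∀ (cnt i : Nat) (acc : Int),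
    (PySem.List.pyRange (i : Int) ((i : Int) + (cnt : Int)) 1).foldl
        (fun acc j => acc + f j) acc
      = acc + ∑ t ∈ Finset.range cnt, f ((i : Int) + (t : Int)) := by
  intro cnt
  induction cnt with
  | zero =>
    intro i acc
    rw [show ((i : Int) + ((0 : Nat) : Int)) = (i : Int) by push_cast; ring]
    rw [PySem.List.pyRange_one_eq_nil (le_refl _)]
    simp
  | succ m ih =>
    intro i acc
    have hlt : (i : Int) < (i : Int) + ((m + 1 : Nat) : Int) := by push_cast; omega
    rw [PySem.List.pyRange_one_cons hlt, List.foldl_cons]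
    have harg2 : (i : Int) + ((m + 1 : Nat) : Int) = ((i + 1 : Nat) : Int) + ((m : Nat) : Int) := by
      push_cast; ring
    rw [harg2, show ((i : Int) + 1) = ((i + 1 : Nat) : Int) by push_cast; ring]
    rw [ih (i + 1)]
    rw [Finset.sum_range_succ']
    have hidx : ∀ t : Nat, ((i + 1 : Nat) : Int) + (t : Int) = (i : Int) + ((t + 1 : Nat) : Int) := by
      intro t; push_cast; ring
    simp only [hidx]
    push_cast
    ring

-- the two Finset sums are equal (reflection of the index)
lemma sums_eq (g w : Nat → Int) (n : Nat) :
    ∑ i ∈ Finset.range n, (g i + g (n - 1 - i)) * w i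
      = ∑ i ∈ Finset.range n, g i * (w i + w (n - 1 - i)) := by
  have hrefl : ∑ i ∈ Finset.range n, g (n - 1 - i) * w i
      = ∑ i ∈ Finset.range n, g i * w (n - 1 - i) := by
    rw [← Finset.sum_range_reflect (fun j => g j * w (n - 1 - j)) n]
    apply Finset.sum_congr rfl
    intro i hi
    rw [Finset.mem_range] at hi
    rw [show n - 1 - (n - 1 - i) = i by omega]
  calc ∑ i ∈ Finset.range n, (g i + g (n - 1 - i)) * w i
      = ∑ i ∈ Finset.range n, (g i * w i + g (n - 1 - i) * w i) := by
        apply Finset.sum_congr rfl; intro i _; ring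
    _ = ∑ i ∈ Finset.range n, g i * w i + ∑ i ∈ Finset.range n, g (n - 1 - i) * w i := by
        rw [Finset.sum_add_distrib]
    _ = ∑ i ∈ Finset.range n, g i * w i + ∑ i ∈ Finset.range n, g i * w (n - 1 - i) := by
        rw [hrefl]
    _ = ∑ i ∈ Finset.range n, g i * (w i + w (n - 1 - i)) := by
        rw [← Finset.sum_add_distrib]
        apply Finset.sum_congr rfl; intro i _; ring

-- ===== VERDICT (by name: the statement is the Claim_ definition above) =====
theorem solve_spec : Claim_equal_solve := by
  intro nums k _ hpre
  unfold Spec_solve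
  rcases hpre with hnil | hk
  · subst hnil
    rfl
  · set a := PySem.List.sorted nums id false with ha
    set K := k.toNat with hKdef
    have hk0 : (K : Int) = k := by omega
    have h1 : (1 : Int) = wv K 0 := by
      unfold wv
      rw [Sv_zero K (by omega)]
      rfl
    -- A's value
    have hA : solve nums k
        = (∑ t ∈ Finset.range a.length,
            (a.getD t 0 + a.getD (a.length - 1 - t) 0) * wv K t) % 1000000007 := by
      rw [solve_eq_fold, PySem.Int.mod_eq_emod_of_pos (by norm_num)]
      have hl := loopA a k hk a.length 0 (by omega) 0
      simp only [Nat.cast_zero, zero_add] at hl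
      rw [← h1] at hl
      rw [hl]
    -- the sweep's first component
    have hmin : min k ((a.length : Nat) : Int) = ((min K a.length : Nat) : Int) := by
      rw [← hk0, ← Nat.cast_min]
    have hw0 : List.replicate a.length (0 : Int) = (List.range a.length).map (wv 0) := by
      rw [List.map_congr_left (l := List.range a.length) (f := wv 0) (g := fun _ => (0 : Int))
        (fun i _ => by unfold wv Sv; simp)]
      simp [List.map_const']
    have hc0 : List.replicate a.length (1 : Int) = (List.range a.length).map (colv 0) := by
      rw [List.map_congr_left (l := List.range a.length) (f := colv 0) (g := fun _ => (1 : Int))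
        (fun i _ => by unfold colv; norm_num)]
      simp [List.map_const']
    have hS : ((PySem.List.pyRange 0 (min k ((a.length : Nat) : Int)) 1).foldl fB
          (List.replicate a.length 0, List.replicate a.length 1)).1
        = (List.range a.length).map (wv (min K a.length)) := by
      rw [hmin, hw0, hc0, sweep a.length (min K a.length)]
    -- B's value
    have hB : solve_alt nums k
        = (∑ t ∈ Finset.range a.length,
            a.getD t 0 * (wv K t + wv K (a.length - 1 - t))) % 1000000007 := by
      rw [solve_alt_eq_fold, PySem.Int.mod_eq_emod_of_pos (by norm_num)]
      rw [show (PySem.List.sorted nums id false) = a from rfl]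
      rw [hS]
      have hl := loopC
        (fun j => PySem.List.pyGetD a j 0 *
          (PySem.List.pyGetD ((List.range a.length).map (wv (min K a.length))) j 0 +
           PySem.List.pyGetD ((List.range a.length).map (wv (min K a.length)))
             (((a.length : Nat) : Int) - 1 - j) 0))
        a.length 0 0
      simp only [Nat.cast_zero, zero_add] at hl
      rw [hl]
      congr 1
      apply Finset.sum_congr rfl
      intro t ht
      rw [Finset.mem_range] at ht
      have hgt : PySem.List.pyGetD a ((t : Nat) : Int) 0 = a.getD t 0 :=
        PySem.List.pyGetD_natCast a t 0
      have hS1 : PySem.List.pyGetD ((List.range a.length).map (wv (min K a.length))) ((t : Nat) : Int) 0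
          = wv K t := by
        rw [PySem.List.pyGetD_natCast, PySem.List.getD_map_range _ _ _ _ ht]
        unfold wv
        rw [Sv_min K a.length t ht]
      have hS2 : PySem.List.pyGetD ((List.range a.length).map (wv (min K a.length)))
            (((a.length : Nat) : Int) - 1 - ((t : Nat) : Int)) 0 = wv K (a.length - 1 - t) := by
        rw [show (((a.length : Nat) : Int) - 1 - ((t : Nat) : Int)) = ((a.length - 1 - t : Nat) : Int) by
          push_cast [Nat.cast_sub (by omega : t ≤ a.length - 1), Nat.cast_sub (by omega : 1 ≤ a.length)]
          ring]
        rw [PySem.List.pyGetD_natCast, PySem.List.getD_map_range _ _ _ _ (by omega)]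
        unfold wv
        rw [Sv_min K a.length _ (by omega)]
      rw [hgt, hS1, hS2]
    rw [hA, hB, sums_eq (fun i => a.getD i 0) (wv K) a.length]
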